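-- pv_equiv track=rewrite | github.com/printjin-gmailcom/2024--Code_States-SSU-Coding_Test | image11.py | solution
-- ===== SOURCE A (Python) =====
-- def solution(order, single_price, set_menu, set_price):
--     min_price = float('inf')
--
--     price = 0
--     for i in range(len(order)):
--         price += order[i]*single_price[i]
--
--     min_price = min(min_price, price)
--
--     for i in range(len(set_menu)):
--         price = set_price[i]
--         cur_order = order[:]
--
--         for j in range(len(cur_order)):
--             cur_order[j] -= set_menu[i][j]
--             if cur_order[j] < 0:
--                 cur_order[j] = 0
--
--         for j in range(len(cur_order)):
--             price += cur_order[j]*single_price[j]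
--
--         min_price = min(min_price, price)
--
--     for i in range(len(set_menu)):
--         for k in range(len(set_menu)):
--             price = set_price[i] + set_price[k]
--             cur_order = order[:]
--
--             for j in range(len(cur_order)):
--                 cur_order[j] -= set_menu[i][j] + set_menu[k][j]
--                 if cur_order[j] < 0:
--                     cur_order[j] = 0
--
--             for j in range(len(cur_order)):
--                 price += cur_order[j]*single_price[j]
--
--             min_price = min(min_price, price)
--
--     return min_price
-- ===== SOURCE B (Python) =====
-- def solution(order, single_price, set_menu, set_price):
--     # Recursive depth-limited search: residual demand is tracked as an
--     # accumulated subtraction vector, leftover cost computed by a single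
--     # clamped formula; no copies of 'order' are mutated.
--     def rec(sub, price, picks):
--         best = price + sum(max(0, o - d) * s
--                            for o, d, s in zip(order, sub, single_price))
--         if picks:
--             for menu, sp in zip(set_menu, set_price):
--                 best = min(best, rec([d + m for d, m in zip(sub, menu)],
--                                      price + sp, picks - 1))
--         return best
--     best = sum(o * s for o, s in zip(order, single_price))
--     for menu, sp in zip(set_menu, set_price):
--         best = min(best, rec(list(menu), sp, 1))
--     return best
-- ===== Notes on version B (the rewrite author's own statement) =====
-- stated objective: alternative
-- what changed: A's three imperative case blocks that copy and mutate 'order' with per-element clamping are replaced by a recursive depth-limited search (at most 2 picks) that threads an accumulated subtraction vector and prices the leftover with one clamped formula max(0, o-d)*s.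
import Mathlib
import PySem

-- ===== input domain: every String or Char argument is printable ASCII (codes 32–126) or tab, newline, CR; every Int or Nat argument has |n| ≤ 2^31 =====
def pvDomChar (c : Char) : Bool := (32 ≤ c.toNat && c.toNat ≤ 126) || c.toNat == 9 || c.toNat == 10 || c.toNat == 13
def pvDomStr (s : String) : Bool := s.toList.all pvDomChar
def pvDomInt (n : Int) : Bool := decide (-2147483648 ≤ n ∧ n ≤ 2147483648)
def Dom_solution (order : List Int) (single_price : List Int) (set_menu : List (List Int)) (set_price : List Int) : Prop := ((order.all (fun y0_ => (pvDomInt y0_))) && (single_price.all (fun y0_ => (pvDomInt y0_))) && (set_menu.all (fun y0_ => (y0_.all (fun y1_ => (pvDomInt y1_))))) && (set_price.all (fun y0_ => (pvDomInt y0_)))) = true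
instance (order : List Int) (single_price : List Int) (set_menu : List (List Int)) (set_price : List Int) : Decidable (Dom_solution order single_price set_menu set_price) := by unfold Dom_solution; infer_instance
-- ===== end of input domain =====

-- B replaces A's three mutate-and-clamp case blocks by a recursive depth-limited
-- search over (subtraction vector, price) states; equal return value on Pre_.

-- ===== PORT A =====
-- 'price += cur[j]*single_price[j]' loop (also the base-price loop), structural
-- recursion over the two lists in parallel (indices 0..len-1, exact on Pre_).
def aPriceLoop : Int → List Int → List Int → Int
  | p, c :: cs, s :: ss => aPriceLoop (p + c * s) cs ss
  | p, _, _ => p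

-- 'cur_order[j] -= set_menu[i][j]; clamp at 0' loop over j in range(len(order))
def aUpd1 : List Int → List Int → List Int
  | c :: cs, x :: xs => (if c - x < 0 then 0 else c - x) :: aUpd1 cs xs
  | cs, _ => cs

-- 'cur_order[j] -= set_menu[i][j] + set_menu[k][j]; clamp at 0' loop
def aUpd2 : List Int → List Int → List Int → List Int
  | c :: cs, x :: xs, y :: ys => (if c - (x + y) < 0 then 0 else c - (x + y)) :: aUpd2 cs xs ys
  | cs, _, _ => cs

-- the i-loops run over i in range(len(set_menu)) reading set_menu[i], set_price[i]:
-- ported as folds over zip set_menu set_price (Pre_ gives len set_price ≥ len set_menu);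
-- min(float('inf'), price) = price, so min_price starts as the base price.
def solution (order : List Int) (single_price : List Int) (set_menu : List (List Int)) (set_price : List Int) : Int :=
  let basePrice := aPriceLoop 0 order single_price
  let minPrice := basePrice
  let minPrice := (set_menu.zip set_price).foldl
    (fun m ip => min m (aPriceLoop ip.2 (aUpd1 order ip.1) single_price)) minPrice
  (set_menu.zip set_price).foldl
    (fun m ip => (set_menu.zip set_price).foldl
      (fun m kp => min m (aPriceLoop (ip.2 + kp.2) (aUpd2 order ip.1 kp.1) single_price)) m)
    minPrice

-- ===== PORT B =====
-- 'sum(o * s for o, s in zip(order, single_price))'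
def bDot : List Int → List Int → Int
  | o :: os, s :: ss => o * s + bDot os ss
  | _, _ => 0

-- 'sum(max(0, o - d) * s for o, d, s in zip(order, sub, single_price))'
def bCost : List Int → List Int → List Int → Int
  | o :: os, d :: ds, s :: ss => max 0 (o - d) * s + bCost os ds ss
  | _, _, _ => 0

-- '[d + m for d, m in zip(sub, menu)]'
def bAdd : List Int → List Int → List Int
  | d :: ds, m :: ms => (d + m) :: bAdd ds ms
  | _, _ => []

-- 'rec(sub, price, picks)': picks is a small non-negative counter, ported as Nat
def bRec (order sp : List Int) (sets : List (List Int × Int)) :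
    List Int → Int → Nat → Int
  | sub, price, 0 => price + bCost order sub sp
  | sub, price, picks + 1 =>
      sets.foldl
        (fun best ms => min best (bRec order sp sets (bAdd sub ms.1) (price + ms.2) picks))
        (price + bCost order sub sp)

def solution_alt (order : List Int) (single_price : List Int) (set_menu : List (List Int)) (set_price : List Int) : Int :=
  let sets := set_menu.zip set_price
  let best := bDot order single_price
  sets.foldl (fun best ms => min best (bRec order single_price sets ms.1 ms.2 1)) best

-- ===== PRECONDITION & SPEC =====
-- Exactly the inputs where Python A returns (no IndexError): A indexes
-- single_price[j] and every set_menu row at j for j < len(order), and set_price[i]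
-- for i < len(set_menu).
def Pre_solution (order : List Int) (single_price : List Int) (set_menu : List (List Int)) (set_price : List Int) : Prop :=
  order.length ≤ single_price.length ∧ set_menu.length ≤ set_price.length ∧
    ∀ m ∈ set_menu, order.length ≤ m.length
instance (order : List Int) (single_price : List Int) (set_menu : List (List Int)) (set_price : List Int) : Decidable (Pre_solution order single_price set_menu set_price) := by unfold Pre_solution; infer_instance

def pvWitness_solution : List Int × List Int × List (List Int) × List Int :=
  ([1, 2], [300, 400], [[1, 0], [1, 1]], [250, 500])

def Spec_solution (order : List Int) (single_price : List Int) (set_menu : List (List Int)) (set_price : List Int) (out : Int) : Prop := out = solution_alt order single_price set_menu set_price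
instance (order : List Int) (single_price : List Int) (set_menu : List (List Int)) (set_price : List Int) (out : Int) : Decidable (Spec_solution order single_price set_menu set_price out) := by unfold Spec_solution; infer_instance

-- ===== CLAIM (what is proved, stated in full; the proofs are below) =====
def Claim_equal_solution : Prop := ∀ (order : List Int) (single_price : List Int) (set_menu : List (List Int)) (set_price : List Int), Dom_solution order single_price set_menu set_price → Pre_solution order single_price set_menu set_price → Spec_solution order single_price set_menu set_price (solution order single_price set_menu set_price)

-- ===== LEMMAS AND PROOFS =====

-- cost of a state reached by picking sets a (and b): B's cost expressions
def cSingle (order sp : List Int) (a : List Int × Int) : Int :=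
  a.2 + bCost order a.1 sp

def cPair (order sp : List Int) (a b : List Int × Int) : Int :=
  a.2 + b.2 + bCost order (bAdd a.1 b.1) sp

theorem aPriceLoop_eq_bDot (order sp : List Int) (p : Int) :
    aPriceLoop p order sp = p + bDot order sp := by
  induction order generalizing sp p with
  | nil => cases sp <;> simp [aPriceLoop, bDot]
  | cons o os ih =>
    cases sp with
    | nil => simp [aPriceLoop, bDot]
    | cons s ss => simp [aPriceLoop, bDot, ih]; ring

theorem aSingle_eq_bCost (order : List Int) : ∀ (m sp : List Int) (p : Int),
    order.length ≤ m.length → order.length ≤ sp.length →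
    aPriceLoop p (aUpd1 order m) sp = p + bCost order m sp := by
  induction order with
  | nil => intro m sp p _ _; cases sp <;> simp [aUpd1, aPriceLoop, bCost]
  | cons o os ih =>
    intro m sp p hm hs
    cases m with
    | nil => simp at hm
    | cons x xs =>
      cases sp with
      | nil => simp at hs
      | cons s ss =>
        simp only [aUpd1, aPriceLoop, bCost]
        rw [ih xs ss _ (by simpa using hm) (by simpa using hs)]
        have hmax : (if o - x < 0 then (0:Int) else o - x) = max 0 (o - x) := by
          simp [max_def]; split_ifs <;> omega
        rw [hmax]; ring

theorem aPair_eq_bCost (order : List Int) : ∀ (mi mk sp : List Int) (p : Int),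
    order.length ≤ mi.length → order.length ≤ mk.length → order.length ≤ sp.length →
    aPriceLoop p (aUpd2 order mi mk) sp = p + bCost order (bAdd mi mk) sp := by
  induction order with
  | nil => intro mi mk sp p _ _ _; cases mi <;> cases mk <;> cases sp <;>
      simp [aUpd2, aPriceLoop, bCost]
  | cons o os ih =>
    intro mi mk sp p hi hk hs
    cases mi with
    | nil => simp at hi
    | cons x xs =>
      cases mk with
      | nil => simp at hk
      | cons y ys =>
        cases sp with
        | nil => simp at hs
        | cons s ss =>
          simp only [aUpd2, aPriceLoop, bAdd, bCost]
          rw [ih xs ys ss _ (by simpa using hi) (by simpa using hk) (by simpa using hs)]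
          have hmax : (if o - (x + y) < 0 then (0:Int) else o - (x + y)) = max 0 (o - (x + y)) := by
            simp [max_def]; split_ifs <;> omega
          rw [hmax]; ring

theorem foldl_flatMap_eq {α β γ : Type} (L : List α) (f : α → List β) (g : γ → β → γ) (a : γ) :
    (L.flatMap f).foldl g a = L.foldl (fun acc x => (f x).foldl g acc) a := by
  induction L generalizing a with
  | nil => simp
  | cons x xs ih => simp [List.flatMap_cons, List.foldl_append, ih]

theorem min_foldl_min (l : List Int) : ∀ (a b : Int),
    l.foldl min (min a b) = min a (l.foldl min b) := by
  induction l with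
  | nil => intro a b; rfl
  | cons x xs ih =>
    intro a b
    simp only [List.foldl_cons]
    rw [min_assoc, ih]

theorem foldl_min_le_init (l : List Int) (a : Int) : l.foldl min a ≤ a := by
  induction l generalizing a with
  | nil => simp
  | cons x xs ih => exact le_trans (ih (min a x)) (min_le_left a x)

theorem foldl_min_le_mem (l : List Int) : ∀ (a x : Int), x ∈ l → l.foldl min a ≤ x := by
  induction l with
  | nil => intro a x hx; simp at hx
  | cons y ys ih =>
    intro a x hx
    rcases List.mem_cons.mp hx with h | h
    · subst h
      exact le_trans (foldl_min_le_init ys (min a x)) (min_le_right a x)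
    · exact ih (min a y) x h

theorem foldl_min_choice (l : List Int) (a : Int) : l.foldl min a = a ∨ l.foldl min a ∈ l := by
  induction l generalizing a with
  | nil => simp
  | cons x xs ih =>
    rcases ih (min a x) with h | h
    · rcases min_cases a x with ⟨he, _⟩ | ⟨he, _⟩
      · left; rw [List.foldl_cons, h, he]
      · right; rw [List.foldl_cons, h, he]; simp
    · right; exact List.mem_cons_of_mem x h

theorem foldl_min_eq_of_mem_iff (a : Int) (l m : List Int)
    (h1 : ∀ x ∈ l, x ∈ m) (h2 : ∀ x ∈ m, x ∈ l) :
    l.foldl min a = m.foldl min a := by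
  apply le_antisymm
  · rcases foldl_min_choice m a with h | h
    · rw [h]; exact foldl_min_le_init l a
    · exact foldl_min_le_mem l a _ (h2 _ h)
  · rcases foldl_min_choice l a with h | h
    · rw [h]; exact foldl_min_le_init m a
    · exact foldl_min_le_mem m a _ (h1 _ h)

-- ===== VERDICT =====
theorem solution_spec : Claim_equal_solution := by
  intro order sp menus prices _ hpre
  obtain ⟨hs, _, hrows⟩ := hpre
  show solution order sp menus prices = solution_alt order sp menus prices
  set sets := menus.zip prices with hsets
  have hmem : ∀ p ∈ sets, order.length ≤ p.1.length := by
    intro p hp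
    exact hrows p.1 (List.of_mem_zip hp).1
  -- A as a fold of min over an explicit candidate list
  have inner : ∀ ip ∈ sets, ∀ acc : Int,
      sets.foldl
        (fun m kp => min m (aPriceLoop (ip.2 + kp.2) (aUpd2 order ip.1 kp.1) sp)) acc
      = (sets.map (cPair order sp ip)).foldl min acc := by
    intro ip hip acc
    rw [List.foldl_map]
    exact PySem.List.foldl_congr_mem _ _ _ _ (fun acc' kp hkp => by
      rw [aPair_eq_bCost order ip.1 kp.1 sp _ (hmem ip hip) (hmem kp hkp) hs]; rfl)
  have singles : sets.foldl
        (fun m ip => min m (aPriceLoop ip.2 (aUpd1 order ip.1) sp)) (aPriceLoop 0 order sp)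
      = (sets.map (cSingle order sp)).foldl min (bDot order sp) := by
    rw [List.foldl_map, aPriceLoop_eq_bDot, zero_add]
    exact PySem.List.foldl_congr_mem _ _ _ _ (fun acc ip hip => by
      rw [aSingle_eq_bCost order ip.1 sp _ (hmem ip hip) hs]; rfl)
  have eA : solution order sp menus prices =
      (sets.map (cSingle order sp)
        ++ sets.flatMap (fun a => sets.map (cPair order sp a))).foldl
        min (bDot order sp) := by
    show sets.foldl
        (fun m ip => sets.foldl
          (fun m kp => min m (aPriceLoop (ip.2 + kp.2) (aUpd2 order ip.1 kp.1) sp)) m)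
        (sets.foldl
          (fun m ip => min m (aPriceLoop ip.2 (aUpd1 order ip.1) sp)) (aPriceLoop 0 order sp))
      = _
    rw [List.foldl_append, foldl_flatMap_eq, singles]
    exact PySem.List.foldl_congr_mem _ _ _ _ (fun acc ip hip => inner ip hip acc)
  -- B: bRec at one remaining pick is a fold of min over the pair costs
  have brec1 : ∀ ip : List Int × Int,
      bRec order sp sets ip.1 ip.2 1
        = (sets.map (cPair order sp ip)).foldl min (cSingle order sp ip) := by
    intro ip
    show sets.foldl
        (fun best ms => min best (bRec order sp sets (bAdd ip.1 ms.1) (ip.2 + ms.2) 0)) _ = _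
    rw [List.foldl_map]
    exact PySem.List.foldl_congr_mem _ _ _ _ (fun acc kp _ => by
      show min acc (ip.2 + kp.2 + bCost order (bAdd ip.1 kp.1) sp) = _
      rfl)
  have eB : solution_alt order sp menus prices =
      (sets.flatMap (fun a => cSingle order sp a :: sets.map (cPair order sp a))).foldl
        min (bDot order sp) := by
    show sets.foldl (fun best ms => min best (bRec order sp sets ms.1 ms.2 1)) (bDot order sp) = _
    rw [foldl_flatMap_eq]
    refine PySem.List.foldl_congr_mem _ _ _ _ (fun acc ip _ => ?_)
    rw [brec1 ip, List.foldl_cons, min_foldl_min]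
  rw [eA, eB]
  apply foldl_min_eq_of_mem_iff
  · intro x hx
    rcases List.mem_append.mp hx with h | h
    · rcases List.mem_map.mp h with ⟨a, ha, rfl⟩
      exact List.mem_flatMap.mpr ⟨a, ha, List.mem_cons_self⟩
    · rcases List.mem_flatMap.mp h with ⟨a, ha, hx2⟩
      rcases List.mem_map.mp hx2 with ⟨b, hb, rfl⟩
      exact List.mem_flatMap.mpr ⟨a, ha,
        List.mem_cons_of_mem _ (List.mem_map.mpr ⟨b, hb, rfl⟩)⟩
  · intro x hx
    rcases List.mem_flatMap.mp hx with ⟨a, ha, hx2⟩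
    rcases List.mem_cons.mp hx2 with h | h
    · subst h
      exact List.mem_append.mpr (Or.inl (List.mem_map.mpr ⟨a, ha, rfl⟩))
    · rcases List.mem_map.mp h with ⟨b, hb, rfl⟩
      exact List.mem_append.mpr (Or.inr
        (List.mem_flatMap.mpr ⟨a, ha, List.mem_map.mpr ⟨b, hb, rfl⟩⟩))
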